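-- pv_equiv track=rewrite | github.com/nc1729/ternary_computer | triangulate/handle_instr.py | signed_trint_value_to_trint
-- ===== SOURCE A (Python) =====
-- septavingt_chars = "MLKJIHGFEDCBA0abcdefghijklm"
--
-- def signed_trint_value_to_trint(arg):
--     output_string = ""
--     dividend = int(arg)
--     remainder = 0
--     for i in range(9):
--         remainder = dividend % 27
--         dividend = dividend // 27
--         if (remainder > 13):
--             remainder -= 27
--             dividend += 1
--         elif (remainder < -13):
--             remainder += 27
--             dividend -= 1
--         output_string += septavingt_chars[13 + remainder]
--     output_string = output_string[::-1]
--     return [output_string[:3], output_string[3:6], output_string[6:9]]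
-- ===== SOURCE B (Python) =====
-- septavingt_chars = "MLKJIHGFEDCBA0abcdefghijklm"
--
-- # Additive bias: 13 * (1 + 27 + ... + 27**8). Adding it turns the balanced
-- # base-27 conversion into a plain (unbalanced) base-27 digit extraction.
-- BIAS = 13 * (27 ** 9 - 1) // 26
--
--
-- def signed_trint_value_to_trint(arg):
--     m = int(arg) + BIAS
--     s = ""
--     for _ in range(9):
--         m, e = m // 27, m % 27
--         s = septavingt_chars[e] + s
--     return [s[:3], s[3:6], s[6:9]]
-- ===== Notes on version B (the rewrite author's own statement) =====
-- stated objective: simpler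
-- what changed: Replaces the balanced base-27 conversion with its carry-propagating conditionals by adding a constant bias 13*(27^9-1)//26 and extracting plain unbalanced base-27 digits with a single divmod per step, building the string most-significant-first so no final reversal is needed.
import Mathlib
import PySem

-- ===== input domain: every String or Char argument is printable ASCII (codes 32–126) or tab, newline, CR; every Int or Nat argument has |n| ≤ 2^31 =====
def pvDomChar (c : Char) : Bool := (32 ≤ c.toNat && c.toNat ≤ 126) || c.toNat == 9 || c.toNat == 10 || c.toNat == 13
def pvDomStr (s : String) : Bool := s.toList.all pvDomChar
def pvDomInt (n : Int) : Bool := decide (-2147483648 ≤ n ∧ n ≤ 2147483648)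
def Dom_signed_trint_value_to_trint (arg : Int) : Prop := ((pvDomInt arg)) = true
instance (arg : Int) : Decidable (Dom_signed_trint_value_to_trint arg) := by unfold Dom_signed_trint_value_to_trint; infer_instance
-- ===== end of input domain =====

-- B replaces A's balanced-digit branches by a constant additive bias and plain
-- base-27 digit extraction, building the string most-significant-first (objective: simpler).

-- ===== PORT A =====
-- Python str modeled as List Char; String.ofList only at the very end (PySem convention).
def septavingt_chars : List Char := "MLKJIHGFEDCBA0abcdefghijklm".toList

-- one iteration of A's for-loop; the index 13 + remainder is always in 0..26, so .getD ' ' never fires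
def stepA (st : List Char × Int × Int) : List Char × Int × Int :=
  let output_string := st.1
  let dividend := st.2.1
  let remainder := PySem.Int.mod dividend 27
  let dividend := PySem.Int.floordiv dividend 27
  let rd : Int × Int :=
    if remainder > 13 then (remainder - 27, dividend + 1)
    else if remainder < -13 then (remainder + 27, dividend - 1)
    else (remainder, dividend)
  (output_string ++ [(PySem.List.pyGet? septavingt_chars (13 + rd.1)).getD ' '], rd.2, rd.1)

def signed_trint_value_to_trint (arg : Int) : List String :=
  let st := (PySem.List.pyRange 0 9 1).foldl (fun s _ => stepA s) (([], arg, 0) : List Char × Int × Int)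
  let output_string := (PySem.List.slice? st.1 none none (-1)).getD []   -- output_string[::-1]
  [String.ofList (PySem.List.slice output_string none (some 3)),
   String.ofList (PySem.List.slice output_string (some 3) (some 6)),
   String.ofList (PySem.List.slice output_string (some 6) (some 9))]

-- ===== PORT B =====
def BIAS : Int := PySem.Int.floordiv (13 * (27 ^ 9 - 1)) 26

-- one iteration of B's for-loop: m, e = m // 27, m % 27; s = septavingt_chars[e] + s
def stepB (st : Int × List Char) : Int × List Char :=
  ((PySem.Int.floordiv st.1 27),
   (PySem.List.pyGet? septavingt_chars (PySem.Int.mod st.1 27)).getD ' ' :: st.2)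

def signed_trint_value_to_trint_alt (arg : Int) : List String :=
  let st := (PySem.List.pyRange 0 9 1).foldl (fun s _ => stepB s) ((arg + BIAS, []) : Int × List Char)
  let s := st.2
  [String.ofList (PySem.List.slice s none (some 3)),
   String.ofList (PySem.List.slice s (some 3) (some 6)),
   String.ofList (PySem.List.slice s (some 6) (some 9))]

-- ===== PRECONDITION & SPEC =====
def Spec_signed_trint_value_to_trint (arg : Int) (out : List String) : Prop := out = signed_trint_value_to_trint_alt arg
instance (arg : Int) (out : List String) : Decidable (Spec_signed_trint_value_to_trint arg out) := by unfold Spec_signed_trint_value_to_trint; infer_instance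

-- ===== CLAIM (what is proved, stated in full; the proofs are below) =====
def Claim_equal_signed_trint_value_to_trint : Prop := ∀ (arg : Int), Dom_signed_trint_value_to_trint arg → Spec_signed_trint_value_to_trint arg (signed_trint_value_to_trint arg)

-- ===== LEMMAS AND PROOFS =====

-- the balanced digit/quotient pair one step of A computes
def balPair (x : Int) : Int × Int :=
  let r := PySem.Int.mod x 27
  let q := PySem.Int.floordiv x 27
  if r > 13 then (r - 27, q + 1)
  else if r < -13 then (r + 27, q - 1)
  else (r, q)

-- bias still to be consumed after n more iterations: 13 * (1 + 27 + … + 27^(n-1))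
def biasN : Nat → Int
  | 0 => 0
  | n + 1 => 13 + 27 * biasN n

lemma stepA_eq (acc : List Char) (x r : Int) :
    stepA (acc, x, r)
      = (acc ++ [(PySem.List.pyGet? septavingt_chars (13 + (balPair x).1)).getD ' '],
         (balPair x).2, (balPair x).1) := rfl

lemma stepB_eq (m : Int) (cs : List Char) :
    stepB (m, cs)
      = (PySem.Int.floordiv m 27,
         (PySem.List.pyGet? septavingt_chars (PySem.Int.mod m 27)).getD ' ' :: cs) := rfl

-- unbalanced digit of the biased value = balanced digit + 13; quotient shifts by the remaining bias
lemma balance (x t : Int) :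
    PySem.Int.mod (x + (13 + 27 * t)) 27 = 13 + (balPair x).1 ∧
    PySem.Int.floordiv (x + (13 + 27 * t)) 27 = (balPair x).2 + t := by
  have h27 : (0 : Int) < 27 := by norm_num
  unfold balPair
  simp only [PySem.Int.mod_eq_emod_of_pos h27, PySem.Int.floordiv_eq_ediv_of_pos h27]
  split_ifs <;> constructor <;> omega

lemma loop_eq (l : List Int) : ∀ (x r : Int) (accA accB : List Char), accA.reverse = accB →
    (l.foldl (fun s _ => stepA s) (accA, x, r)).1.reverse
      = (l.foldl (fun s _ => stepB s) (x + biasN l.length, accB)).2 := by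
  induction l with
  | nil => intro x r accA accB h; simpa using h
  | cons hd tl ih =>
    intro x r accA accB h
    have hb := balance x (biasN tl.length)
    have hm : x + biasN (tl.length + 1) = x + (13 + 27 * biasN tl.length) := by
      simp [biasN]
    have hB : stepB (x + biasN (tl.length + 1), accB)
        = ((balPair x).2 + biasN tl.length,
           (PySem.List.pyGet? septavingt_chars (13 + (balPair x).1)).getD ' ' :: accB) := by
      rw [stepB_eq, hm, hb.1, hb.2]
    simp only [List.foldl_cons, List.length_cons, stepA_eq, hB]
    exact ih (balPair x).2 (balPair x).1 _ _ (by simp [h])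

-- ===== VERDICT (by name: the statement is the Claim_ definition above) =====
theorem signed_trint_value_to_trint_spec : Claim_equal_signed_trint_value_to_trint := by
  intro arg _
  unfold Spec_signed_trint_value_to_trint signed_trint_value_to_trint signed_trint_value_to_trint_alt
  have hbias : BIAS = biasN 9 := by decide
  have hlen : (PySem.List.pyRange 0 9 1).length = 9 := by decide
  have key := loop_eq (PySem.List.pyRange 0 9 1) arg 0 [] [] rfl
  rw [hlen] at key
  simp only [PySem.List.slice?_none_none_neg_one, Option.getD_some, hbias, key]
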